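-- pv_equiv track=rewrite | github.com/nir20ane/Python | leetcode/Lists_and_Strings/Solution.py | Solution
-- ===== SOURCE A (Python) =====
-- def Solution(ranks):
--     m = max(ranks)
--     dict = {}
--     for i in range(len(ranks)):
--         if ranks[i] < m:
--             if ranks[i] not in dict:
--                 dict[ranks[i]] = 1
--             else:
--                 dict[ranks[i]] += 1
--     count = 0
--     for key in dict.keys():
--         if key == m-1:
--             count += dict[key]
--         elif key in dict and key+1 in dict:
--             count += dict[key]
--         else:
--             count = count
--     return count
-- ===== SOURCE B (Python) =====
-- def Solution(ranks):
--     m = max(ranks)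
--     s = set(ranks)
--     return sum(1 for x in ranks if x < m and x + 1 in s)
-- ===== Notes on version B (the rewrite author's own statement) =====
-- stated objective: simpler
-- what changed: Replaces A's two-phase frequency-dict build plus iteration over distinct keys with a single per-element pass counting x < max with x+1 in a membership set.
import Mathlib
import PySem

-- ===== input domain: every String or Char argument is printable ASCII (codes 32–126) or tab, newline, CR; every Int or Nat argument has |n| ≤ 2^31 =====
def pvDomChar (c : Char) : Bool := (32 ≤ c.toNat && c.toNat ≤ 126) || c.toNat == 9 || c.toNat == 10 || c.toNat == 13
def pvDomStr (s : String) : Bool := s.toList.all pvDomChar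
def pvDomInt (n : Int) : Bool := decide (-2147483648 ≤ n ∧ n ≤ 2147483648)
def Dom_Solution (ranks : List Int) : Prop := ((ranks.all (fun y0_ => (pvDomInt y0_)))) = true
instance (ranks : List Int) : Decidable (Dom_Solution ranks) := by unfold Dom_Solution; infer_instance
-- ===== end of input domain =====

-- B replaces A's frequency-dict build plus a loop over distinct keys by one pass over the
-- original list counting x < max with x+1 present in a membership set (objective: simpler).

-- ===== PORT A =====
def Solution (ranks : List Int) : Int :=
  let m : Int := (PySem.List.max? ranks (fun x => x)).getD 0
  let d : PySem.Dict Int Int :=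
    (PySem.List.pyRange 0 (ranks.length : Int) 1).foldl (fun d i =>
      let x := PySem.List.pyGetD ranks i 0
      if x < m then
        if d.contains x = false then d.insert x 1
        else d.insert x (d.getD x 0 + 1)
      else d) PySem.Dict.empty
  d.keys.foldl (fun count key =>
    if key = m - 1 then count + d.getD key 0
    else if d.contains key = true ∧ d.contains (key + 1) = true then count + d.getD key 0
    else count) 0

-- ===== PORT B =====
def Solution_alt (ranks : List Int) : Int :=
  let m : Int := (PySem.List.max? ranks (fun x => x)).getD 0
  let s : PySem.Set Int := PySem.Set.ofList ranks
  ranks.foldl (fun c x => if x < m ∧ PySem.Set.contains s (x + 1) then c + 1 else c) 0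

-- ===== PRECONDITION & SPEC =====
-- Pre_ excludes only the empty list, on which Python's max(ranks) raises ValueError in both A and B.
def Pre_Solution (ranks : List Int) : Prop := ranks ≠ []
instance (ranks : List Int) : Decidable (Pre_Solution ranks) := by unfold Pre_Solution; infer_instance
def pvWitness_Solution : List Int := ([1, 2, 2, 3])

def Spec_Solution (ranks : List Int) (out : Int) : Prop := out = Solution_alt ranks
instance (ranks : List Int) (out : Int) : Decidable (Spec_Solution ranks out) := by unfold Spec_Solution; infer_instance

-- ===== CLAIM (what is proved, stated in full; the proofs are below) =====
def Claim_equal_Solution : Prop := ∀ (ranks : List Int), Dom_Solution ranks → Pre_Solution ranks → Spec_Solution ranks (Solution ranks)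

-- ===== LEMMAS AND PROOFS =====

-- sum over a Nodup key list of a filtered count equals a filtered length
lemma sum_indicator (Q : Int → Bool) (x : Int) (K : List Int) (hnd : K.Nodup) (hx : x ∈ K) :
    (K.map (fun k => if Q k ∧ k = x then (1:Int) else 0)).sum = if Q x then 1 else 0 := by
  induction K with
  | nil => cases hx
  | cons a K ih =>
    rcases List.nodup_cons.mp hnd with ⟨ha, hnd'⟩
    by_cases hax : a = x
    · subst hax
      have hzero : ∀ y ∈ K.map (fun k => if Q k ∧ k = a then (1:Int) else 0), y = 0 := by
        intro y hy
        rcases List.mem_map.mp hy with ⟨k, hk, rfl⟩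
        have hne : k ≠ a := by rintro rfl; exact ha hk
        simp [hne]
      simp only [List.map_cons, List.sum_cons]
      rw [List.sum_eq_zero hzero]
      by_cases hq : Q a <;> simp [hq]
    · have hx' : x ∈ K := by
        rcases List.mem_cons.mp hx with h | h
        · exact absurd h.symm hax
        · exact h
      have hne : ¬ (Q a = true ∧ a = x) := fun ⟨_, h2⟩ => hax h2
      simp only [List.map_cons, List.sum_cons, ih hnd' hx', if_neg hne, zero_add]

lemma sum_count (l K : List Int) (Q : Int → Bool) (hnd : K.Nodup) (hsub : ∀ x ∈ l, x ∈ K) :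
    (K.map (fun k => if Q k then (l.count k : Int) else 0)).sum = (l.countP Q : Int) := by
  induction l with
  | nil => simp
  | cons x l ih =>
    have hxK := hsub x (by simp)
    have hsub' : ∀ y ∈ l, y ∈ K := fun y hy => hsub y (by simp [hy])
    have hsplit : ∀ k, (if Q k then (((x :: l).count k : Int)) else 0)
        = (if Q k then (l.count k : Int) else 0) + (if Q k ∧ k = x then 1 else 0) := by
      intro k
      by_cases hkx : k = x
      · subst hkx
        by_cases hq : Q k
        · simp only [hq, if_true, and_true, List.count_cons_self]
          push_cast; ring
        · simp [hq]
      · have hxk : ¬ x = k := fun h => hkx h.symm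
        by_cases hq : Q k
        · simp [hq, hkx, List.count_cons, hxk]
        · simp [hq]
    calc (K.map (fun k => if Q k then (((x :: l).count k : Int)) else 0)).sum
        = (K.map (fun k => (if Q k then (l.count k : Int) else 0) + (if Q k ∧ k = x then 1 else 0))).sum := by
          simp only [hsplit]
      _ = (K.map (fun k => if Q k then (l.count k : Int) else 0)).sum
          + (K.map (fun k => if Q k ∧ k = x then (1:Int) else 0)).sum :=
          PySem.List.sum_map_add_int K _ _
      _ = (l.countP Q : Int) + (if Q x then 1 else 0) := by
          rw [ih hsub', sum_indicator Q x K hnd hxK]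
      _ = ((x :: l).countP Q : Int) := by
          by_cases hq : Q x <;> simp [hq]

lemma Solution_eq_alt (ranks : List Int) (h : ranks ≠ []) : Solution ranks = Solution_alt ranks := by
  obtain ⟨m, hm⟩ : ∃ m, PySem.List.max? ranks (fun x => x) = some m := by
    cases hmx : PySem.List.max? ranks (fun x => x) with
    | none => exact absurd ((PySem.List.max?_eq_none_iff ranks _).mp hmx) h
    | some v => exact ⟨v, rfl⟩
  have hmmem : m ∈ ranks := PySem.List.max?_mem hm
  have hmax : ∀ y ∈ ranks, y ≤ m := fun y hy => PySem.List.max?_isMax hm y hy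
  set F := ranks.filter (fun x => decide (x < m)) with hF
  set Qm : Int → Bool := fun k => decide (k = m - 1 ∨ (k + 1) ∈ F) with hQm
  -- A's first loop builds Counter(F)
  have hd : (PySem.List.pyRange 0 (ranks.length : Int) 1).foldl (fun d i =>
      let x := PySem.List.pyGetD ranks i 0
      if x < m then
        if d.contains x = false then d.insert x 1
        else d.insert x (d.getD x 0 + 1)
      else d) PySem.Dict.empty = PySem.Dict.counter F := by
    refine Eq.trans (PySem.List.foldl_pyRange_zero_pyGetD' ranks 0
      (fun (d : PySem.Dict Int Int) (x : Int) => if x < m then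
        (if d.contains x = false then d.insert x 1 else d.insert x (d.getD x 0 + 1)) else d)
      PySem.Dict.empty) ?_
    have hcongr : ranks.foldl (fun (d : PySem.Dict Int Int) (x : Int) =>
        if x < m then
          (if d.contains x = false then d.insert x 1 else d.insert x (d.getD x 0 + 1))
        else d) PySem.Dict.empty
      = ranks.foldl (fun (d : PySem.Dict Int Int) (x : Int) => if x < m then d.insert x (d.getD x 0 + 1) else d) PySem.Dict.empty := by
      apply PySem.List.foldl_congr_mem
      intro d x _
      by_cases hlt : x < m
      · rw [if_pos hlt, if_pos hlt]
        by_cases hc : d.contains x = false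
        · rw [if_pos hc, PySem.Dict.getD_of_not_contains d 0 hc]; norm_num
        · rw [if_neg hc]
      · rw [if_neg hlt, if_neg hlt]
    rw [hcongr, PySem.List.foldl_ite_eq_foldl_filter, ← hF,
      PySem.Dict.foldl_insert_getD_add_one_eq_counter]
  -- A's second loop sums the counts of keys satisfying Qm
  have hA : Solution ranks = (F.countP Qm : Int) := by
    unfold Solution
    simp only [hm, Option.getD_some, hd]
    have hkeys : (PySem.Dict.counter F).keys = PySem.Set.ofList F := PySem.Dict.keys_counter F
    have hloop : (PySem.Dict.counter F).keys.foldl (fun count key =>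
        if key = m - 1 then count + (PySem.Dict.counter F).getD key 0
        else if (PySem.Dict.counter F).contains key = true ∧ (PySem.Dict.counter F).contains (key + 1) = true
          then count + (PySem.Dict.counter F).getD key 0
        else count) 0
      = (PySem.Dict.counter F).keys.foldl (fun count key =>
          count + (if Qm key then (F.count key : Int) else 0)) 0 := by
      apply PySem.List.foldl_congr_mem
      intro c k hk
      have hkF : k ∈ F := by
        rw [hkeys] at hk; exact (PySem.Set.mem_ofList F k).mp hk
      have hck : (PySem.Dict.counter F).contains k = true := by
        rw [PySem.Dict.contains_counter]; simpa using hkF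
      have hgd : (PySem.Dict.counter F).getD k 0 = (F.count k : Int) := PySem.Dict.getD_counter F k
      by_cases h1 : k = m - 1
      · have hq : Qm k = true := by simp [hQm, h1]
        rw [if_pos h1, if_pos hq, hgd]
      · rw [if_neg h1]
        by_cases h2 : (k + 1) ∈ F
        · have hc2 : (PySem.Dict.counter F).contains (k + 1) = true := by
            rw [PySem.Dict.contains_counter]; simpa using h2
          have hq : Qm k = true := by simp [hQm, h2]
          rw [if_pos ⟨hck, hc2⟩, if_pos hq, hgd]
        · have hc2 : ¬ (PySem.Dict.counter F).contains (k + 1) = true := by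
            rw [PySem.Dict.contains_counter]; simpa using h2
          have hq : ¬ Qm k = true := by simp [hQm, h1, h2]
          rw [if_neg (fun hand => hc2 hand.2), if_neg hq, add_zero]
    rw [hloop, PySem.List.foldl_add _ (fun key => if Qm key then (F.count key : Int) else 0) 0,
      hkeys, sum_count F (PySem.Set.ofList F) Qm (PySem.Set.nodup_ofList F)
        (fun x hx => (PySem.Set.mem_ofList F x).mpr hx)]
    ring
  -- B's single pass counts the same elements
  have hB : Solution_alt ranks = (F.countP Qm : Int) := by
    unfold Solution_alt
    simp only [hm, Option.getD_some]
    rw [PySem.List.foldl_ite_add_one]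
    have hcnt : ranks.countP (fun x => decide (x < m ∧ PySem.Set.contains (PySem.Set.ofList ranks) (x + 1) = true))
        = ranks.countP (fun x => Qm x && decide (x < m)) := by
      apply List.countP_congr
      intro x hx
      have hcon : (PySem.Set.contains (PySem.Set.ofList ranks) (x + 1) = true) ↔ (x + 1) ∈ ranks := by
        simp [PySem.Set.contains, PySem.Set.mem_ofList]
      have key : (x < m ∧ (x + 1) ∈ ranks) ↔ ((x = m - 1 ∨ (x + 1) ∈ F) ∧ x < m) := by
        constructor
        · rintro ⟨hlt, hmem1⟩
          refine ⟨?_, hlt⟩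
          by_cases hx1 : x + 1 = m
          · exact Or.inl (by omega)
          · refine Or.inr ?_
            rw [hF, List.mem_filter]
            have hle := hmax _ hmem1
            exact ⟨hmem1, by simp only [decide_eq_true_eq]; omega⟩
        · rintro ⟨hq, hlt⟩
          refine ⟨hlt, ?_⟩
          rcases hq with h1 | h2
          · have hxe : x + 1 = m := by omega
            rw [hxe]; exact hmmem
          · rw [hF, List.mem_filter] at h2; exact h2.1
      simp only [hQm]
      simp only [Bool.and_eq_true, decide_eq_true_eq]
      rw [hcon]
      exact key
    rw [hcnt]
    have hfil : F.countP Qm = ranks.countP (fun a => Qm a && decide (a < m)) := List.countP_filter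
    rw [hfil]
    ring
  rw [hA, hB]

-- ===== VERDICT (by name: the statement is the Claim_ definition above) =====
theorem Solution_spec : Claim_equal_Solution := by
  intro ranks _ hpre
  unfold Spec_Solution
  exact Solution_eq_alt ranks hpre
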